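-- pv_equiv track=rewrite | github.com/Sixshaman/SolarTears | UtilsBuild/GenerateOGLFunctionList.py | compile_wgl_function_list_cpp
-- ===== SOURCE A (Python) =====
-- end_gl_function_list_cpp = """\
-- }"""
--
-- start_wgl_function_list_cpp = """\
-- #include "OGLFunctionsWin32.hpp"
--
-- #define DEFINE_WGL_FUNCTION(type, name) type name = nullptr;
--
-- extern "C"
-- {"""
--
-- def func_type_from_name(func_name):
-- 	return "PFN" + func_name.upper() + "PROC"
--
-- def create_function_wgl_definitions(func_names, use_extension_indent):
-- 	cpp_definitions = ""
--
-- 	max_len = max([len(func_type_from_name(func_name)) for func_name in func_names])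
-- 	for func_name in func_names:
-- 		func_type = func_type_from_name(func_name)
--
-- 		if use_extension_indent:
-- 			cpp_definitions += "\t"
--
-- 		cpp_definitions += "DEFINE_WGL_FUNCTION("
-- 		cpp_definitions += func_type
-- 		cpp_definitions += ","
-- 		cpp_definitions += (max_len - len(func_type) + 1) * ' '
-- 		cpp_definitions += func_name
-- 		cpp_definitions += ")"
-- 		cpp_definitions += "\n"
--
-- 	return cpp_definitions
--
-- def compile_wgl_function_list_cpp(funcs):
-- 	cpp_data = ""
--
-- 	cpp_data += start_wgl_function_list_cpp
--
-- 	current_extension = ""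
-- 	current_indent_functions = []
-- 	for func in funcs:
-- 		func_name      = func[0]
-- 		func_extension = func[2]
--
-- 		if func_extension != current_extension:
-- 			if current_extension != "":
-- 				cpp_data += create_function_wgl_definitions(current_indent_functions, True)
-- 				current_indent_functions.clear()
--
-- 				cpp_data += "#endif"
-- 				cpp_data += "\n"
--
-- 			current_extension = func_extension
--
-- 			if current_extension != "":
-- 				cpp_data += "\n#ifdef " + func_extension + "\n"
--
-- 		if current_extension != "":
-- 			current_indent_functions.append(func_name)
--
-- 	if current_extension != "":
-- 		cpp_data += create_function_wgl_definitions(current_indent_functions, current_extension != "")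
-- 		cpp_data += "#endif\n"
--
-- 	cpp_data += end_gl_function_list_cpp
--
-- 	return cpp_data
-- ===== SOURCE B (Python) =====
-- end_gl_function_list_cpp = """\
-- }"""
--
-- start_wgl_function_list_cpp = """\
-- #include "OGLFunctionsWin32.hpp"
--
-- #define DEFINE_WGL_FUNCTION(type, name) type name = nullptr;
--
-- extern "C"
-- {"""
--
-- def func_type_from_name(func_name):
-- 	return "PFN" + func_name.upper() + "PROC"
--
-- def create_function_wgl_definitions(func_names, use_extension_indent):
-- 	cpp_definitions = ""
--
-- 	max_len = max([len(func_type_from_name(func_name)) for func_name in func_names])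
-- 	for func_name in func_names:
-- 		func_type = func_type_from_name(func_name)
--
-- 		if use_extension_indent:
-- 			cpp_definitions += "\t"
--
-- 		cpp_definitions += "DEFINE_WGL_FUNCTION("
-- 		cpp_definitions += func_type
-- 		cpp_definitions += ","
-- 		cpp_definitions += (max_len - len(func_type) + 1) * ' '
-- 		cpp_definitions += func_name
-- 		cpp_definitions += ")"
-- 		cpp_definitions += "\n"
--
-- 	return cpp_definitions
--
-- def _runs(funcs):
-- 	"""Split funcs into maximal runs of consecutive entries sharing the same
-- 	extension field, returned as (extension, [names]) pairs."""
-- 	groups = []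
-- 	i = 0
-- 	n = len(funcs)
-- 	while i < n:
-- 		j = i + 1
-- 		while j < n and funcs[j][2] == funcs[i][2]:
-- 			j += 1
-- 		groups.append((funcs[i][2], [f[0] for f in funcs[i:j]]))
-- 		i = j
-- 	return groups
--
-- def compile_wgl_function_list_cpp(funcs):
-- 	parts = [start_wgl_function_list_cpp]
-- 	for extension, names in _runs(funcs):
-- 		if extension != "":
-- 			parts.append("\n#ifdef " + extension + "\n")
-- 			parts.append(create_function_wgl_definitions(names, True))
-- 			parts.append("#endif\n")
-- 	parts.append(end_gl_function_list_cpp)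
-- 	return "".join(parts)
-- ===== Notes on version B (the rewrite author's own statement) =====
-- stated objective: idiomatic
-- what changed: Replaces A's single-pass state machine (current extension, pending-names buffer, emit-on-change plus a duplicated flush after the loop) with a two-phase decomposition: first split funcs into maximal consecutive runs of equal extension, then render each non-empty-extension run as a self-contained #ifdef block and join the parts.
import Mathlib
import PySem

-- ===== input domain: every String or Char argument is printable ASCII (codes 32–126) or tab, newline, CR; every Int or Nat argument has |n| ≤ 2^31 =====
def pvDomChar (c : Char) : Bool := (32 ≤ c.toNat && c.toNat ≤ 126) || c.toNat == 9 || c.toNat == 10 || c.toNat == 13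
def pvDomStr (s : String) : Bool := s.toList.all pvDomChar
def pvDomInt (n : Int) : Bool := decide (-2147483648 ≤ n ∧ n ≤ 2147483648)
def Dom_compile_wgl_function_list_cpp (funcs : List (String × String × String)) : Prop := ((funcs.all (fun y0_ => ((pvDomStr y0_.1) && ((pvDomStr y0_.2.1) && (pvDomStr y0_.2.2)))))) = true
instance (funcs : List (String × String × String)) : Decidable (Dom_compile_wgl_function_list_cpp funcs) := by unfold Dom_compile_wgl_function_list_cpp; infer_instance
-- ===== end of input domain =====

-- B replaces A's emit-on-extension-change state machine by an idiomatic two-phase form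
-- (split into maximal consecutive equal-extension runs, then render each non-empty run);
-- same output, same cost.

-- shared module constants and helper (A and B both use create_function_wgl_definitions)
def wglEndCpp : String := "}"

def wglStartCpp : String :=
  "#include \"OGLFunctionsWin32.hpp\"\n\n#define DEFINE_WGL_FUNCTION(type, name) type name = nullptr;\n\nextern \"C\"\n{"

def funcTypeFromName (funcName : String) : String :=
  "PFN" ++ PySem.Str.upper funcName ++ "PROC"

def createFunctionWglDefinitions (funcNames : List String) (useExtensionIndent : Bool) : String :=
  -- max([...]) : none only on funcNames = [], where Python raises; both programs only
  -- call this with nonempty lists, and on [] the loop below yields "" regardless of maxLen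
  let maxLen : Int :=
    (PySem.List.max? (funcNames.map (fun n => PySem.Str.len (funcTypeFromName n))) (fun x => x)).getD 0
  funcNames.foldl (fun cppDefinitions funcName =>
    let funcType := funcTypeFromName funcName
    let cppDefinitions := if useExtensionIndent then cppDefinitions ++ "\t" else cppDefinitions
    cppDefinitions ++ "DEFINE_WGL_FUNCTION(" ++ funcType ++ ","
      ++ String.ofList (List.replicate (maxLen - PySem.Str.len funcType + 1).toNat ' ')
      ++ funcName ++ ")" ++ "\n") ""

-- ===== PORT A =====
def wglStepA (st : String × String × List String) (func : String × String × String) :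
    String × String × List String :=
  let funcName := func.1
  let funcExtension := func.2.2
  let st1 :=
    if funcExtension ≠ st.2.1 then
      let (cppData, names) :=
        if st.2.1 ≠ "" then
          (st.1 ++ createFunctionWglDefinitions st.2.2 true ++ "#endif" ++ "\n", ([] : List String))
        else (st.1, st.2.2)
      let cppData := if funcExtension ≠ "" then cppData ++ "\n#ifdef " ++ funcExtension ++ "\n" else cppData
      (cppData, funcExtension, names)
    else st
  if st1.2.1 ≠ "" then (st1.1, st1.2.1, st1.2.2 ++ [funcName]) else st1

def compile_wgl_function_list_cpp (funcs : List (String × String × String)) : String :=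
  let st := funcs.foldl wglStepA (wglStartCpp, "", [])
  (if st.2.1 ≠ "" then
      st.1 ++ createFunctionWglDefinitions st.2.2 (decide (st.2.1 ≠ "")) ++ "#endif\n"
    else st.1) ++ wglEndCpp

-- ===== PORT B =====
-- _runs: maximal consecutive runs of equal extension (the inner while-scan is the
-- takeWhile/dropWhile split at the head's extension)
def wglRuns : List (String × String × String) → List (String × List String)
  | [] => []
  | f :: rest =>
    (f.2.2, f.1 :: (rest.takeWhile (fun g => g.2.2 == f.2.2)).map (·.1))
      :: wglRuns (rest.dropWhile (fun g => g.2.2 == f.2.2))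
  termination_by l => l.length
  decreasing_by
    simpa using Nat.lt_succ_of_le (List.length_dropWhile_le _ _)

def wglGroupParts (g : String × List String) : List String :=
  if g.1 ≠ "" then
    ["\n#ifdef " ++ g.1 ++ "\n", createFunctionWglDefinitions g.2 true, "#endif\n"]
  else []

def compile_wgl_function_list_cpp_alt (funcs : List (String × String × String)) : String :=
  PySem.Str.join "" ([wglStartCpp] ++ (wglRuns funcs).flatMap wglGroupParts ++ [wglEndCpp])

-- ===== PRECONDITION & SPEC =====
def Spec_compile_wgl_function_list_cpp (funcs : List (String × String × String)) (out : String) : Prop := out = compile_wgl_function_list_cpp_alt funcs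
instance (funcs : List (String × String × String)) (out : String) : Decidable (Spec_compile_wgl_function_list_cpp funcs out) := by unfold Spec_compile_wgl_function_list_cpp; infer_instance

-- ===== CLAIM (what is proved, stated in full; the proofs are below) =====
def Claim_equal_compile_wgl_function_list_cpp : Prop := ∀ (funcs : List (String × String × String)), Dom_compile_wgl_function_list_cpp funcs → Spec_compile_wgl_function_list_cpp funcs (compile_wgl_function_list_cpp funcs)

-- ===== LEMMAS AND PROOFS =====

-- concatenation of a list of strings
def catStr (l : List String) : String := l.foldr (· ++ ·) ""

theorem catStr_nil : catStr [] = "" := rfl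

theorem catStr_cons (a : String) (l : List String) : catStr (a :: l) = a ++ catStr l := rfl

theorem flatten_intersperse_nil (l : List (List Char)) :
    (List.intersperse ([] : List Char) l).flatten = l.flatten := by
  induction l with
  | nil => rfl
  | cons a t ih =>
    cases t with
    | nil => rfl
    | cons b t' => simpa [List.intersperse] using ih

theorem join_empty_eq_catStr (l : List String) : PySem.Str.join "" l = catStr l := by
  induction l with
  | nil => rfl
  | cons a t ih =>
    have h0 : "".toList = ([] : List Char) := rfl
    simp only [PySem.Str.join, PySem.Chars.join, List.map_cons, List.intercalate, h0,
      flatten_intersperse_nil, List.flatten_cons] at ih ⊢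
    rw [String.ofList_append, String.ofList_toList, ih, catStr_cons]

theorem catStr_append (l1 l2 : List String) : catStr (l1 ++ l2) = catStr l1 ++ catStr l2 := by
  induction l1 with
  | nil => simp [catStr]
  | cons a t ih => simp [catStr_cons, ih, String.append_assoc]

-- A's state after the loop, flushed exactly as A's tail code does
def wglFinA (st : String × String × List String) : String :=
  if st.2.1 ≠ "" then
    st.1 ++ createFunctionWglDefinitions st.2.2 (decide (st.2.1 ≠ "")) ++ "#endif\n"
  else st.1

-- B's rendering of the remaining functions
def wglRender (funcs : List (String × String × String)) : String :=
  catStr ((wglRuns funcs).flatMap wglGroupParts)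

theorem wglRender_cons (f : String × String × String) (rest : List (String × String × String)) :
    wglRender (f :: rest) =
      catStr (wglGroupParts (f.2.2, f.1 :: (rest.takeWhile (fun g => g.2.2 == f.2.2)).map (·.1)))
        ++ wglRender (rest.dropWhile (fun g => g.2.2 == f.2.2)) := by
  rw [wglRender, wglRuns]
  simp [List.flatMap_cons, catStr_append, wglRender]

theorem wglRender_dropEmpty (l : List (String × String × String)) :
    wglRender (l.dropWhile (fun g => g.2.2 == "")) = wglRender l := by
  cases l with
  | nil => rfl
  | cons h t =>
    by_cases hh : h.2.2 = ""
    · rw [List.dropWhile_cons_of_pos (by simp [hh]), wglRender_cons]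
      simp [wglGroupParts, hh, catStr_nil]
    · rw [List.dropWhile_cons_of_neg (by simp [hh])]

-- the main loop invariant: A's flushed loop state equals B's rendering
theorem wglLoop (n : Nat) : ∀ (funcs : List (String × String × String)), funcs.length ≤ n →
    (∀ s : String, wglFinA (funcs.foldl wglStepA (s, "", [])) = s ++ wglRender funcs) ∧
    (∀ (s e : String) (names : List String), e ≠ "" →
      wglFinA (funcs.foldl wglStepA (s, e, names)) =
        s ++ createFunctionWglDefinitions
              (names ++ (funcs.takeWhile (fun g => g.2.2 == e)).map (·.1)) true
          ++ ("#endif\n" ++ wglRender (funcs.dropWhile (fun g => g.2.2 == e)))) := by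
  induction n with
  | zero =>
    intro funcs hlen
    have hnil : funcs = [] := List.eq_nil_of_length_eq_zero (Nat.le_zero.mp hlen)
    subst hnil
    constructor
    · intro s
      simp [wglFinA, wglRender, wglRuns, catStr_nil]
    · intro s e names he
      simp [wglFinA, wglRender, wglRuns, catStr_nil, he, String.append_assoc]
  | succ n ih =>
    intro funcs hlen
    cases funcs with
    | nil =>
      constructor
      · intro s
        simp [wglFinA, wglRender, wglRuns, catStr_nil]
      · intro s e names he
        simp [wglFinA, wglRender, wglRuns, catStr_nil, he, String.append_assoc]
    | cons f rest =>
      have hr : rest.length ≤ n := by simpa using Nat.lt_succ_iff.mp (by simpa using hlen)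
      constructor
      · intro s
        by_cases hf : f.2.2 = ""
        · have hstep : wglStepA (s, "", []) f = (s, "", []) := by
            simp [wglStepA, hf]
          rw [List.foldl_cons, hstep, (ih rest hr).1 s, wglRender_cons, hf]
          simp [wglGroupParts, wglRender_dropEmpty, catStr_nil, String.empty_append]
        · have hstep : wglStepA (s, "", []) f =
              (s ++ "\n#ifdef " ++ f.2.2 ++ "\n", f.2.2, [f.1]) := by
            simp [wglStepA, hf]
          rw [List.foldl_cons, hstep, (ih rest hr).2 _ f.2.2 [f.1] hf]
          rw [wglRender_cons]
          simp [wglGroupParts, hf, catStr_cons, catStr_nil, String.append_assoc,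
            String.append_empty]
      · intro s e names he
        by_cases hfe : f.2.2 = e
        · have hstep : wglStepA (s, e, names) f = (s, e, names ++ [f.1]) := by
            simp [wglStepA, hfe, he]
          rw [List.foldl_cons, hstep, (ih rest hr).2 s e (names ++ [f.1]) he]
          rw [List.takeWhile_cons_of_pos (by simp [hfe]),
            List.dropWhile_cons_of_pos (by simp [hfe])]
          simp [String.append_assoc]
        · by_cases hf : f.2.2 = ""
          · have hstep : wglStepA (s, e, names) f =
                (s ++ createFunctionWglDefinitions names true ++ "#endif" ++ "\n", "", []) := by
              simp [wglStepA, he, hf]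
            rw [List.foldl_cons, hstep, (ih rest hr).1]
            rw [List.takeWhile_cons_of_neg (by simp [hfe]),
              List.dropWhile_cons_of_neg (by simp [hfe])]
            rw [wglRender_cons, hf]
            have hlit : ("#endif" ++ "\n" : String) = "#endif\n" := rfl
            simp [wglGroupParts, wglRender_dropEmpty, String.append_assoc, hlit, catStr_nil,
              String.empty_append]
          · have hstep : wglStepA (s, e, names) f =
                (s ++ createFunctionWglDefinitions names true ++ "#endif" ++ "\n"
                    ++ "\n#ifdef " ++ f.2.2 ++ "\n", f.2.2, [f.1]) := by
              simp [wglStepA, hfe, he, hf]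
            rw [List.foldl_cons, hstep, (ih rest hr).2 _ f.2.2 [f.1] hf]
            rw [List.takeWhile_cons_of_neg (by simp [hfe]),
              List.dropWhile_cons_of_neg (by simp [hfe])]
            rw [wglRender_cons]
            have hlit : ("#endif" ++ "\n" : String) = "#endif\n" := rfl
            simp [wglGroupParts, hf, catStr_cons, catStr_nil, String.append_assoc, hlit,
              String.append_empty]
            rw [show ("#endif\n\n#ifdef " : String) = "#endif\n" ++ "\n#ifdef " from rfl,
              String.append_assoc]

-- ===== VERDICT (by name: the statement is the Claim_ definition above) =====
theorem compile_wgl_function_list_cpp_spec : Claim_equal_compile_wgl_function_list_cpp := by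
  intro funcs _
  show compile_wgl_function_list_cpp funcs = compile_wgl_function_list_cpp_alt funcs
  have hA : compile_wgl_function_list_cpp funcs =
      wglFinA (funcs.foldl wglStepA (wglStartCpp, "", [])) ++ wglEndCpp := rfl
  have hB : compile_wgl_function_list_cpp_alt funcs =
      wglStartCpp ++ (wglRender funcs ++ (wglEndCpp ++ "")) := by
    rw [compile_wgl_function_list_cpp_alt, join_empty_eq_catStr, catStr_append, catStr_append,
      catStr_cons, catStr_nil, catStr_cons, catStr_nil, wglRender]
    simp [String.append_assoc, String.append_empty]
  rw [hA, hB, (wglLoop funcs.length funcs (le_refl _)).1 wglStartCpp]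
  simp [String.append_assoc, String.append_empty]
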